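-- pv_equiv track=rewrite | github.com/Bryan-9603012/2026-python | weeks/week-08/solutions/1114405023/10193/main.py | min_b_plus_c
-- ===== SOURCE A (Python) =====
-- import math
--
-- def min_b_plus_c(a: int) -> int:
--     x = a * a + 1
--     best = 10**30
--     for d in range(1, int(math.isqrt(x)) + 1):
--         if x % d == 0:
--             e = x // d
--             best = min(best, 2 * a + d + e)
--     return best
-- ===== SOURCE B (Python) =====
-- import math
--
-- def min_b_plus_c(a: int) -> int:
--     # d + x//d over divisor pairs of x is minimized at the largest divisor
--     # d <= isqrt(x), so scanning downward the first divisor found is optimal.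
--     x = a * a + 1
--     for d in range(math.isqrt(x), 0, -1):
--         if x % d == 0:
--             return 2 * a + d + x // d
--     # unreachable: d = 1 always divides x
-- ===== Notes on version B (the rewrite author's own statement) =====
-- stated objective: alternative
-- what changed: Instead of scanning all d in [1, isqrt(x)] upward and maintaining a running minimum over a sentinel, B scans downward from isqrt(x) and returns immediately at the first divisor, which is provably the optimum; no min accumulator is kept.
import Mathlib
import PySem

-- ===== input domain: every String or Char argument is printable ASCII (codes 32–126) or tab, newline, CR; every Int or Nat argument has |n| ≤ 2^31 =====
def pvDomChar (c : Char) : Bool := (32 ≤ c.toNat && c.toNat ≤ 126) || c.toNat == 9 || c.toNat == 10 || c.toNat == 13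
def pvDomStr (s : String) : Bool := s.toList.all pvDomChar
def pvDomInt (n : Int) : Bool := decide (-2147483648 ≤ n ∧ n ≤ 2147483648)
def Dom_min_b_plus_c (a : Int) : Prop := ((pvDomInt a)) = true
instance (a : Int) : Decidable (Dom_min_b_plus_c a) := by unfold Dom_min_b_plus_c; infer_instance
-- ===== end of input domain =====

-- B replaces A's full upward scan with a running minimum by a downward scan from isqrt(x)
-- that returns at the first divisor found (provably the optimum); same asymptotic cost.

-- math.isqrt on a nonnegative int: exact via Nat.sqrt (both ports call isqrt on x = a*a+1 ≥ 1)
def pvIsqrt (x : Int) : Int := (Nat.sqrt x.toNat : Int)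

-- ===== PORT A =====
def min_b_plus_c (a : Int) : Int :=
  let x := a * a + 1
  (PySem.List.pyRange 1 (pvIsqrt x + 1) 1).foldl
    (fun best d =>
      if PySem.Int.mod x d = 0 then
        let e := PySem.Int.floordiv x d
        min best (2 * a + d + e)
      else best)
    (10 ^ 30)

-- ===== PORT B =====
-- the descending for-loop of Source B: counter n stands for the current d; 0 = loop exhausted
-- (unreachable in Source B, since d = 1 always divides x)
def pvAltLoop (a x : Int) : Nat → Int
  | 0 => 0
  | n + 1 =>
    let d : Int := (n + 1 : Nat)
    if PySem.Int.mod x d = 0 then 2 * a + d + PySem.Int.floordiv x d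
    else pvAltLoop a x n

def min_b_plus_c_alt (a : Int) : Int :=
  let x := a * a + 1
  pvAltLoop a x (pvIsqrt x).toNat

-- ===== PRECONDITION & SPEC =====
def Spec_min_b_plus_c (a : Int) (out : Int) : Prop := out = min_b_plus_c_alt a
instance (a : Int) (out : Int) : Decidable (Spec_min_b_plus_c a out) := by unfold Spec_min_b_plus_c; infer_instance

-- ===== CLAIM (what is proved, stated in full; the proofs are below) =====
def Claim_equal_min_b_plus_c : Prop := ∀ (a : Int), Dom_min_b_plus_c a → Spec_min_b_plus_c a (min_b_plus_c a)

-- ===== LEMMAS AND PROOFS =====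

theorem pv_mod (x d : Int) (hd : 0 < d) : PySem.Int.mod x d = x % d :=
  PySem.Int.mod_eq_emod_of_pos hd

theorem pv_div (x d : Int) (hd : 0 < d) : PySem.Int.floordiv x d = x / d :=
  PySem.Int.floordiv_eq_ediv_of_pos hd

-- pvAltLoop returns the value f d* at the LARGEST divisor d* ≤ n of x
theorem pvAltLoop_spec (a x : Int) (_hx : 0 < x) :
    ∀ n : Nat, 1 ≤ n →
      ∃ d : Nat, 1 ≤ d ∧ d ≤ n ∧ x % (d : Int) = 0 ∧
        pvAltLoop a x n = 2 * a + (d : Int) + x / (d : Int) ∧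
        (∀ e : Nat, d < e → e ≤ n → x % (e : Int) ≠ 0) := by
  intro n
  induction n with
  | zero => omega
  | succ m ih =>
    intro _
    have hcast : ((m + 1 : Nat) : Int) = (m : Int) + 1 := by push_cast; ring
    by_cases h : PySem.Int.mod x ((m : Int) + 1) = 0
    · refine ⟨m + 1, by omega, le_refl _, ?_, ?_, by omega⟩
      · rw [hcast, ← pv_mod x _ (by positivity)]; exact h
      · simp only [pvAltLoop]
        rw [hcast, if_pos h, pv_div x _ (by positivity)]
    · have hm : 1 ≤ m := by
        by_contra hm0
        have hm0' : m = 0 := by omega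
        subst hm0'
        apply h
        norm_num [pv_mod x 1 one_pos]
      obtain ⟨d, hd1, hdm, hdvd, hval, hmax⟩ := ih hm
      refine ⟨d, hd1, by omega, hdvd, ?_, ?_⟩
      · simp only [pvAltLoop]
        rw [hcast, if_neg h]; exact hval
      · intro e hde hem
        rcases Nat.lt_or_ge e (m + 1) with he | he
        · exact hmax e hde (by omega)
        · have : e = m + 1 := by omega
          subst this
          intro hcon
          apply h
          rw [pv_mod x _ (by positivity), ← hcast]; exact hcon

-- key inequality: among divisors not exceeding √x, the larger one gives the smaller d + x/d
theorem pv_key (x d e : Int) (_hx : 0 < x) (hd : 0 < d) (hde : d < e)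
    (hee : e * e ≤ x) (hdd : x % d = 0) (hed : x % e = 0) :
    e + x / e ≤ d + x / d := by
  have he : 0 < e := lt_trans hd hde
  have hq : d * (x / d) = x := Int.mul_ediv_cancel' (Int.dvd_of_emod_eq_zero hdd)
  have hr : e * (x / e) = x := Int.mul_ediv_cancel' (Int.dvd_of_emod_eq_zero hed)
  have hre : e ≤ x / e := by nlinarith
  have hde' : d * e < x := by nlinarith
  -- (x/d - x/e) * d * e = x * (e - d) ≥ (e - d) * d * e  since  d*e < x
  nlinarith [mul_pos hd he, mul_le_mul_of_nonneg_right (le_of_lt hde') (by omega : (0:Int) ≤ e - d)]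

-- A's fold over [1..n] equals min of the initial best with B's downward-scan value
theorem pv_fold_eq (a x : Int) (hx : 0 < x) :
    ∀ n : Nat, 1 ≤ n → ((n : Int) * (n : Int) ≤ x) → ∀ b : Int,
      (PySem.List.pyRange 1 ((n : Int) + 1) 1).foldl
        (fun best d =>
          if PySem.Int.mod x d = 0 then
            let e := PySem.Int.floordiv x d
            min best (2 * a + d + e)
          else best) b
      = min b (pvAltLoop a x n) := by
  intro n
  induction n with
  | zero => omega
  | succ m ih =>
    intro _ hsq b
    rcases Nat.eq_or_lt_of_le (by omega : 1 ≤ m + 1) with h1 | h1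
    · -- base: n = 1
      have hm0 : m = 0 := by omega
      subst hm0
      rw [show ((0 + 1 : Nat) : Int) + 1 = 1 + 1 by norm_num,
          PySem.List.pyRange_one_singleton]
      simp only [List.foldl, pvAltLoop]
      norm_num [pv_mod x 1 one_pos, pv_div x 1 one_pos]
    · -- step: n = m + 1 with m ≥ 1
      have hm1 : 1 ≤ m := by omega
      have hmx : (m : Int) * (m : Int) ≤ x := by
        have : (m : Int) * (m : Int) ≤ ((m : Int) + 1) * ((m : Int) + 1) := by nlinarith [Int.natCast_nonneg m]
        calc (m : Int) * (m : Int) ≤ ((m : Int) + 1) * ((m : Int) + 1) := this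
          _ ≤ x := by push_cast at hsq ⊢; linarith
      have hsplit : PySem.List.pyRange 1 (((m + 1 : Nat) : Int) + 1) 1
          = PySem.List.pyRange 1 ((m : Int) + 1) 1 ++ [(m : Int) + 1] := by
        rw [show ((m + 1 : Nat) : Int) + 1 = ((m : Int) + 1) + 1 by push_cast; ring]
        exact PySem.List.pyRange_one_succ_right (by omega)
      rw [hsplit, List.foldl_append, ih hm1 hmx b]
      simp only [List.foldl]
      simp only [pvAltLoop]
      rw [show ((m + 1 : Nat) : Int) = (m : Int) + 1 by push_cast; ring]
      by_cases h : PySem.Int.mod x ((m : Int) + 1) = 0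
      · rw [if_pos h, if_pos h]
        -- need: f (m+1) ≤ pvAltLoop a x m, then min (min b A) B = min b B
        obtain ⟨d, hd1, hdm, hdvd, hval, _⟩ := pvAltLoop_spec a x hx m hm1
        have hkey : ((m : Int) + 1) + x / ((m : Int) + 1) ≤ (d : Int) + x / (d : Int) := by
          apply pv_key x (d : Int) ((m : Int) + 1) hx (by exact_mod_cast hd1)
            (by exact_mod_cast Nat.lt_succ_of_le hdm)
            (by push_cast at hsq ⊢; linarith) hdvd
          · rw [← pv_mod x _ (by positivity)]; exact h
        have hfle : 2 * a + ((m : Int) + 1) + PySem.Int.floordiv x ((m : Int) + 1)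
            ≤ pvAltLoop a x m := by
          rw [hval, pv_div x _ (by positivity)]
          linarith
        simp only [min_assoc]
        congr 1
        exact min_eq_right hfle
      · rw [if_neg h, if_neg h]

-- the optimum value is far below A's sentinel 10^30 on the domain |a| ≤ 2^31
theorem pv_alt_small (a : Int) (ha : -2147483648 ≤ a ∧ a ≤ 2147483648) :
    pvAltLoop a (a * a + 1) (Nat.sqrt (a * a + 1).toNat) ≤ 10 ^ 30 := by
  set x : Int := a * a + 1 with hxdef
  have hx : 0 < x := by nlinarith [mul_self_nonneg a]
  have hs1 : 1 ≤ Nat.sqrt x.toNat := by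
    have h1 : 1 ≤ x.toNat := by omega
    calc 1 = Nat.sqrt 1 := by norm_num
      _ ≤ Nat.sqrt x.toNat := Nat.sqrt_le_sqrt h1
  obtain ⟨d, hd1, hdm, hdvd, hval, _⟩ := pvAltLoop_spec a x hx _ hs1
  rw [hval]
  have hd0 : (0 : Int) < (d : Int) := by exact_mod_cast hd1
  have hxx : x ≤ 2 ^ 62 + 1 := by nlinarith [ha.1, ha.2]
  have hdx : (d : Int) ≤ x := Int.le_of_dvd hx (Int.dvd_of_emod_eq_zero hdvd)
  have hqx : x / (d : Int) ≤ x := Int.ediv_le_self _ (le_of_lt hx)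
  nlinarith [ha.1, ha.2]

-- ===== VERDICT (by name: the statement is the Claim_ definition above) =====
theorem min_b_plus_c_spec : Claim_equal_min_b_plus_c := by
  intro a hdom
  unfold Spec_min_b_plus_c min_b_plus_c min_b_plus_c_alt
  have hdom' : -2147483648 ≤ a ∧ a ≤ 2147483648 := by
    have := hdom; unfold Dom_min_b_plus_c pvDomInt at this; simpa using this
  set x : Int := a * a + 1 with hxdef
  have hx : 0 < x := by nlinarith [mul_self_nonneg a]
  have hs1 : 1 ≤ Nat.sqrt x.toNat := by
    have h1 : 1 ≤ x.toNat := by omega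
    calc 1 = Nat.sqrt 1 := by norm_num
      _ ≤ Nat.sqrt x.toNat := Nat.sqrt_le_sqrt h1
  have hsq : ((Nat.sqrt x.toNat : Int)) * ((Nat.sqrt x.toNat : Int)) ≤ x := by
    have h := Nat.sqrt_le' x.toNat
    rw [pow_two] at h
    have h2 : ((Nat.sqrt x.toNat * Nat.sqrt x.toNat : Nat) : Int) ≤ (x.toNat : Int) :=
      Int.ofNat_le.mpr h
    push_cast at h2
    rwa [Int.toNat_of_nonneg (le_of_lt hx)] at h2
  have hiq : pvIsqrt x = (Nat.sqrt x.toNat : Int) := rfl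
  simp only [hiq, Int.toNat_natCast]
  rw [pv_fold_eq a x hx (Nat.sqrt x.toNat) hs1 hsq (10 ^ 30)]
  exact min_eq_right (pv_alt_small a hdom')
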